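-- pv_equiv track=rewrite | github.com/dlwnsgur9242/code_algorithm | 쓰레기수거.py | find_safest_distance
-- ===== SOURCE A (Python) =====
-- from collections import deque
--
-- def bfs(start, n, m, grid):
--     visited = [[False] * m for _ in range(n)]
--     queue = deque([(start, 0)])
--     visited[start[0]][start[1]] = True
--
--     while queue:
--         current, distance = queue.popleft()
--
--         for dx, dy in [(1, 0), (-1, 0), (0, 1), (0, -1), (1, 1), (-1, -1), (-1, 1), (1, -1)]:
--             nx, ny = current[0] + dx, current[1] + dy
--
--             if 0 <= nx < n and 0 <= ny < m and not visited[nx][ny] and grid[nx][ny] == 0: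
--                 visited[nx][ny] = True
--                 queue.append(((nx, ny), distance + 1))
--
--     return distance
--
-- def find_safest_distance(n, m, grid):
--     max_safest_distance = 0
--
--     for i in range(n):
--         for j in range(m):
--             if grid[i][j] == 0:
--                 safest_distance = bfs((i, j), n, m, grid)
--                 max_safest_distance = max(max_safest_distance, safest_distance)
--
--     return max_safest_distance
-- ===== SOURCE B (Python) =====
-- def find_safest_distance(n, m, grid):
--     best = 0
--     for i in range(n):
--         for j in range(m):
--             if grid[i][j] == 0:
--                 # layered BFS from (i, j): count nonempty frontier levels
--                 visited = {(i, j)}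
--                 frontier = [(i, j)]
--                 dist = 0
--                 while frontier:
--                     nxt = []
--                     for (x, y) in frontier:
--                         for dx, dy in [(1, 0), (-1, 0), (0, 1), (0, -1), (1, 1), (-1, -1), (-1, 1), (1, -1)]:
--                             nx2, ny2 = x + dx, y + dy
--                             if 0 <= nx2 < n and 0 <= ny2 < m and (nx2, ny2) not in visited and grid[nx2][ny2] == 0:
--                                 visited.add((nx2, ny2))
--                                 nxt.append((nx2, ny2))
--                     if not nxt:
--                         break
--                     frontier = nxt
--                     dist += 1
--                 best = max(best, dist)
--     return best
-- ===== Notes on version B (the rewrite author's own statement) =====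
-- stated objective: alternative
-- what changed: The inner BFS is re-done as a layered (frontier-at-a-time) search that keeps a visited set of cells and a level counter, instead of A's deque of (cell, distance) pairs with a boolean visited matrix; the eccentricity is the number of nonempty frontier levels rather than the distance tag of the last dequeued node.
import Mathlib
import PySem

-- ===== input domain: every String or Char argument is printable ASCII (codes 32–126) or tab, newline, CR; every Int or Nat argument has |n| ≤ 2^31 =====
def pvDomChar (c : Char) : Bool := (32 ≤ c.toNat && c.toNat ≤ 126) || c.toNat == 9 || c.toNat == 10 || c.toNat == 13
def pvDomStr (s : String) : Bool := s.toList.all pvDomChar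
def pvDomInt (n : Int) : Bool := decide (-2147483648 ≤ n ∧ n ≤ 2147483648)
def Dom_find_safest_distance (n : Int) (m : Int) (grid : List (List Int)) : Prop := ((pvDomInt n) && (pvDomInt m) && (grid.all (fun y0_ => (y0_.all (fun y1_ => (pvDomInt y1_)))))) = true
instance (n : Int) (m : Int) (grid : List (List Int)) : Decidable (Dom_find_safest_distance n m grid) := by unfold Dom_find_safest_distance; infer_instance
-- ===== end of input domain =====

-- B replaces A's inner BFS (deque of (cell,distance) pairs + boolean visited matrix) by a layered
-- frontier BFS with a visited set and a level counter; equal return values, no speed claim.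

-- ===== PORT A =====
def pvDirs : List (Int × Int) := [(1,0),(-1,0),(0,1),(0,-1),(1,1),(-1,-1),(-1,1),(1,-1)]

-- grid[x][y]; the default 1 is unreachable: every access is guarded by 0 ≤ x < n, 0 ≤ y < m and Pre_
def pvGridAt (grid : List (List Int)) (x y : Int) : Int :=
  PySem.List.pyGetD (PySem.List.pyGetD grid x []) y 1

-- visited[x][y]; default unreachable (accesses guarded to the n×m matrix built below)
def pvVGet (V : List (List Bool)) (x y : Int) : Bool :=
  PySem.List.pyGetD (PySem.List.pyGetD V x []) y true

-- visited[x][y] = True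
def pvVSet (V : List (List Bool)) (x y : Int) : List (List Bool) :=
  PySem.List.pySetD V x (PySem.List.pySetD (PySem.List.pyGetD V x []) y true)

-- body of A's 'for dx, dy in [...]' loop; state = (visited, queue after the popleft)
def pvStepA (n m : Int) (grid : List (List Int)) (c : Int × Int) (d : Int)
    (s : List (List Bool) × List ((Int × Int) × Int)) (dxy : Int × Int) :
    List (List Bool) × List ((Int × Int) × Int) :=
  if 0 ≤ c.1 + dxy.1 ∧ c.1 + dxy.1 < n ∧ 0 ≤ c.2 + dxy.2 ∧ c.2 + dxy.2 < m ∧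
      pvVGet s.1 (c.1 + dxy.1) (c.2 + dxy.2) = false ∧ pvGridAt grid (c.1 + dxy.1) (c.2 + dxy.2) = 0 then
    (pvVSet s.1 (c.1 + dxy.1) (c.2 + dxy.2), s.2 ++ [((c.1 + dxy.1, c.2 + dxy.2), d + 1)])
  else s

-- A's 'while queue' loop; fuel n*m bounds the number of popleft's (each enqueue marks a fresh cell)
def pvALoop (n m : Int) (grid : List (List Int)) :
    Nat → List ((Int × Int) × Int) → List (List Bool) → Int → Int
  | 0, _, _, dist => dist
  | _ + 1, [], _, dist => dist
  | fuel + 1, (c, d) :: q, V, _ =>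
      let s := pvDirs.foldl (pvStepA n m grid c d) (V, q)
      pvALoop n m grid fuel s.2 s.1 d

def pvBfsA (n m : Int) (grid : List (List Int)) (start : Int × Int) : Int :=
  pvALoop n m grid (n.toNat * m.toNat) [(start, 0)]
    (pvVSet (List.replicate n.toNat (List.replicate m.toNat false)) start.1 start.2) 0

def find_safest_distance (n : Int) (m : Int) (grid : List (List Int)) : Int :=
  (PySem.List.pyRange 0 n 1).foldl (fun best i =>
    (PySem.List.pyRange 0 m 1).foldl (fun best j =>
      if pvGridAt grid i j = 0 then max best (pvBfsA n m grid (i, j)) else best) best) 0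

-- ===== PORT B =====
-- body of B's inner 'for dx, dy in [...]' loop; state = (visited set, next frontier so far)
def pvStepB (n m : Int) (grid : List (List Int)) (c : Int × Int)
    (s : PySem.Set (Int × Int) × List (Int × Int)) (dxy : Int × Int) :
    PySem.Set (Int × Int) × List (Int × Int) :=
  if 0 ≤ c.1 + dxy.1 ∧ c.1 + dxy.1 < n ∧ 0 ≤ c.2 + dxy.2 ∧ c.2 + dxy.2 < m ∧
      ¬ ((c.1 + dxy.1, c.2 + dxy.2) ∈ s.1) ∧ pvGridAt grid (c.1 + dxy.1) (c.2 + dxy.2) = 0 then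
    (PySem.Set.add s.1 (c.1 + dxy.1, c.2 + dxy.2), s.2 ++ [(c.1 + dxy.1, c.2 + dxy.2)])
  else s

-- one whole frontier expanded into (new visited set, next frontier)
def pvExpand (n m : Int) (grid : List (List Int)) (S : PySem.Set (Int × Int))
    (f : List (Int × Int)) : PySem.Set (Int × Int) × List (Int × Int) :=
  f.foldl (fun s c => pvDirs.foldl (pvStepB n m grid c) s) (S, [])

-- B's 'while frontier' loop; fuel n*m bounds the number of levels
def pvBLoop (n m : Int) (grid : List (List Int)) :
    Nat → List (Int × Int) → PySem.Set (Int × Int) → Int → Int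
  | 0, _, _, d => d
  | fuel + 1, f, S, d =>
      if f = [] then d
      else
        let e := pvExpand n m grid S f
        if e.2 = [] then d else pvBLoop n m grid fuel e.2 e.1 (d + 1)

def pvBfsB (n m : Int) (grid : List (List Int)) (start : Int × Int) : Int :=
  pvBLoop n m grid (n.toNat * m.toNat) [start] (PySem.Set.ofList [start]) 0

def find_safest_distance_alt (n : Int) (m : Int) (grid : List (List Int)) : Int :=
  (PySem.List.pyRange 0 n 1).foldl (fun best i =>
    (PySem.List.pyRange 0 m 1).foldl (fun best j =>
      if pvGridAt grid i j = 0 then max best (pvBfsB n m grid (i, j)) else best) best) 0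

-- ===== PRECONDITION & SPEC =====
-- Pre_ excludes exactly the inputs on which Python A raises IndexError: when n > 0 and m > 0,
-- a grid with fewer than n rows or with one of its first n rows shorter than m.
def Pre_find_safest_distance (n : Int) (m : Int) (grid : List (List Int)) : Prop :=
  0 < n → 0 < m → (n ≤ (grid.length : Int) ∧ ∀ row ∈ grid.take n.toNat, m ≤ (row.length : Int))

instance (n : Int) (m : Int) (grid : List (List Int)) : Decidable (Pre_find_safest_distance n m grid) := by
  unfold Pre_find_safest_distance; infer_instance

def pvWitness_find_safest_distance : Int × Int × List (List Int) := (2, 2, [[0, 0], [1, 0]])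

def Spec_find_safest_distance (n : Int) (m : Int) (grid : List (List Int)) (out : Int) : Prop := out = find_safest_distance_alt n m grid
instance (n : Int) (m : Int) (grid : List (List Int)) (out : Int) : Decidable (Spec_find_safest_distance n m grid out) := by unfold Spec_find_safest_distance; infer_instance

-- ===== CLAIM (what is proved, stated in full; the proofs are below) =====
def Claim_equal_find_safest_distance : Prop := ∀ (n : Int) (m : Int) (grid : List (List Int)), Dom_find_safest_distance n m grid → Pre_find_safest_distance n m grid → Spec_find_safest_distance n m grid (find_safest_distance n m grid)

-- ===== LEMMAS AND PROOFS =====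

-- visited matrix has n rows of length m
def pvDims (n m : Int) (V : List (List Bool)) : Prop :=
  V.length = n.toNat ∧ ∀ row ∈ V, row.length = m.toNat

-- number of still-unvisited cells (false entries)
def pvUnvis (V : List (List Bool)) : Nat := (V.map (fun r => r.count false)).sum

-- the visited matrix of A and the visited set of B describe the same cells
def pvR (n m : Int) (V : List (List Bool)) (S : PySem.Set (Int × Int)) : Prop :=
  pvDims n m V ∧ ∀ x y : Int, 0 ≤ x → x < n → 0 ≤ y → y < m → (pvVGet V x y = true ↔ (x, y) ∈ S)

theorem pvALoop_nil (n m : Int) (grid : List (List Int)) (fuel : Nat) (V : List (List Bool)) (dist : Int) :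
    pvALoop n m grid fuel [] V dist = dist := by
  cases fuel <;> rfl

theorem pvVGet_eq (V : List (List Bool)) (x y : Int) (hx : 0 ≤ x) (hy : 0 ≤ y) :
    pvVGet V x y = (V.getD x.toNat []).getD y.toNat true := by
  simp [pvVGet, PySem.List.pyGetD_of_nonneg, hx, hy]

theorem pvVSet_eq (V : List (List Bool)) (x y : Int) (hx : 0 ≤ x) (hy : 0 ≤ y) :
    pvVSet V x y = V.set x.toNat ((V.getD x.toNat []).set y.toNat true) := by
  simp [pvVSet, PySem.List.pySetD_of_nonneg, PySem.List.pyGetD_of_nonneg, hx, hy]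

theorem pvCount_set_true (r : List Bool) : ∀ (j : Nat), j < r.length → r.getD j true = false →
    (r.set j true).count false + 1 = r.count false := by
  induction r with
  | nil => intro j h; simp at h
  | cons b t ih =>
    intro j hj hg
    cases j with
    | zero =>
      simp [List.getD] at hg
      subst hg
      simp
    | succ k =>
      have := ih k (by simpa using hj) (by simpa [List.getD] using hg)
      simp only [List.set, List.count_cons]
      omega

theorem pvUnvis_set (V : List (List Bool)) : ∀ (i : Nat) (r' : List Bool), i < V.length →
    pvUnvis (V.set i r') + (V.getD i []).count false = pvUnvis V + r'.count false := by
  induction V with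
  | nil => intro i r' h; simp at h
  | cons r t ih =>
    intro i r' hi
    cases i with
    | zero => simp [pvUnvis, List.getD]; omega
    | succ k =>
      have := ih k r' (by simpa using hi)
      simp only [pvUnvis, List.set, List.map_cons, List.sum_cons, List.getD] at *
      simp only [List.getElem?_cons_succ] at *
      omega

theorem pvUnvis_vset (n m : Int) (V : List (List Bool)) (x y : Int)
    (hd : pvDims n m V) (hx0 : 0 ≤ x) (hxn : x < n) (hy0 : 0 ≤ y) (hym : y < m)
    (hg : pvVGet V x y = false) : pvUnvis (pvVSet V x y) + 1 = pvUnvis V := by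
  obtain ⟨hlen, hrows⟩ := hd
  have hx' : x.toNat < V.length := by omega
  have hrowe : V.getD x.toNat [] = V[x.toNat] := List.getD_eq_getElem V [] hx'
  have hrlen : (V.getD x.toNat []).length = m.toNat := by
    rw [hrowe]; exact hrows _ (List.getElem_mem hx')
  have hy' : y.toNat < (V.getD x.toNat []).length := by omega
  have hg' : (V.getD x.toNat []).getD y.toNat true = false := by
    rw [← pvVGet_eq V x y hx0 hy0]; exact hg
  have hcnt := pvCount_set_true (V.getD x.toNat []) y.toNat hy' hg'
  have hset := pvUnvis_set V x.toNat ((V.getD x.toNat []).set y.toNat true) hx'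
  rw [pvVSet_eq V x y hx0 hy0]
  omega

theorem pvDims_vset (n m : Int) (V : List (List Bool)) (x y : Int) (hd : pvDims n m V)
    (hx0 : 0 ≤ x) (hxn : x < n) (hy0 : 0 ≤ y) : pvDims n m (pvVSet V x y) := by
  obtain ⟨hlen, hrows⟩ := hd
  have hx' : x.toNat < V.length := by omega
  rw [pvVSet_eq V x y hx0 hy0]
  refine ⟨by simp [hlen], ?_⟩
  intro row hrow
  rcases List.mem_or_eq_of_mem_set hrow with h | h
  · exact hrows _ h
  · subst h
    rw [List.length_set, List.getD_eq_getElem V [] hx']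
    exact hrows _ (List.getElem_mem hx')

theorem pvVGet_vset (n m : Int) (V : List (List Bool)) (x y x' y' : Int)
    (hd : pvDims n m V) (hx0 : 0 ≤ x) (hxn : x < n) (hy0 : 0 ≤ y) (hym : y < m)
    (hx0' : 0 ≤ x') (hy0' : 0 ≤ y') :
    pvVGet (pvVSet V x y) x' y' = if x' = x ∧ y' = y then true else pvVGet V x' y' := by
  obtain ⟨hlen, hrows⟩ := hd
  have hx' : x.toNat < V.length := by omega
  have hrlen : (V.getD x.toNat []).length = m.toNat := by
    rw [List.getD_eq_getElem V [] hx']; exact hrows _ (List.getElem_mem hx')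
  have hy' : y.toNat < (V.getD x.toNat []).length := by omega
  rw [pvVSet_eq V x y hx0 hy0, pvVGet_eq _ x' y' hx0' hy0', pvVGet_eq V x' y' hx0' hy0']
  simp only [List.getD] at hy' ⊢
  by_cases hxx : x' = x
  · subst hxx
    rw [List.getElem?_set_self hx']
    by_cases hyy : y' = y
    · subst hyy
      simp only [Option.getD_some]
      rw [List.getElem?_set_self hy']
      simp
    · have hne : y.toNat ≠ y'.toNat := by omega
      rw [if_neg (by simp [hyy])]
      simp only [Option.getD_some]
      rw [List.getElem?_set_ne hne]
  · have hne : x.toNat ≠ x'.toNat := by omega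
    rw [if_neg (by simp [hxx])]
    rw [List.getElem?_set_ne hne]

theorem pvR_add (n m : Int) (V : List (List Bool)) (S : PySem.Set (Int × Int)) (x y : Int)
    (h : pvR n m V S) (hx0 : 0 ≤ x) (hxn : x < n) (hy0 : 0 ≤ y) (hym : y < m) :
    pvR n m (pvVSet V x y) (PySem.Set.add S (x, y)) := by
  obtain ⟨hd, hiff⟩ := h
  refine ⟨pvDims_vset n m V x y hd hx0 hxn hy0, ?_⟩
  intro x' y' hx0' hxn' hy0' hym'
  rw [pvVGet_vset n m V x y x' y' hd hx0 hxn hy0 hym hx0' hy0', PySem.Set.mem_add]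
  by_cases hxy : x' = x ∧ y' = y
  · simp [hxy.1, hxy.2]
  · rw [if_neg hxy, hiff x' y' hx0' hxn' hy0' hym']
    have : ¬ ((x', y') = (x, y)) := by
      simp only [Prod.mk.injEq]; exact hxy
    simp [this]

-- a fold whose state is (value, accumulator-that-only-appends) splits off its accumulator
theorem pvFoldl_state_acc {σ τ ι : Type} (F : (σ × List τ) → ι → (σ × List τ))
    (hF : ∀ s a x, F (s, a) x = ((F (s, []) x).1, a ++ (F (s, []) x).2)) :
    ∀ (l : List ι) (s : σ) (a : List τ),
      l.foldl F (s, a) = ((l.foldl F (s, [])).1, a ++ (l.foldl F (s, [])).2) := by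
  intro l
  induction l with
  | nil => intro s a; simp
  | cons x l ih =>
    intro s a
    simp only [List.foldl_cons]
    rw [hF s a x, ih]
    have h2 := ih (F (s, []) x).1 (F (s, []) x).2
    rw [Prod.mk.eta] at h2
    rw [h2]
    simp [List.append_assoc]

theorem pvStepA_shape (n m : Int) (grid : List (List Int)) (c : Int × Int) (d : Int) :
    ∀ s a x, pvStepA n m grid c d (s, a) x
      = ((pvStepA n m grid c d (s, []) x).1, a ++ (pvStepA n m grid c d (s, []) x).2) := by
  intro s a x
  simp only [pvStepA]
  split <;> simp

theorem pvStepB_shape (n m : Int) (grid : List (List Int)) (c : Int × Int) :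
    ∀ s a x, pvStepB n m grid c (s, a) x
      = ((pvStepB n m grid c (s, []) x).1, a ++ (pvStepB n m grid c (s, []) x).2) := by
  intro s a x
  simp only [pvStepB]
  split <;> simp

theorem pvALoop_cons (n m : Int) (grid : List (List Int)) (fuel : Nat) (c : Int × Int)
    (d : Int) (q : List ((Int × Int) × Int)) (V : List (List Bool)) (dist : Int) :
    pvALoop n m grid (fuel + 1) ((c, d) :: q) V dist
      = pvALoop n m grid fuel (pvDirs.foldl (pvStepA n m grid c d) (V, q)).2
          (pvDirs.foldl (pvStepA n m grid c d) (V, q)).1 d := rfl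

theorem pvBLoop_succ (n m : Int) (grid : List (List Int)) (fuel : Nat) (f : List (Int × Int))
    (S : PySem.Set (Int × Int)) (d : Int) :
    pvBLoop n m grid (fuel + 1) f S d
      = if f = [] then d
        else if (pvExpand n m grid S f).2 = [] then d
        else pvBLoop n m grid fuel (pvExpand n m grid S f).2 (pvExpand n m grid S f).1 (d + 1) := rfl

-- correspondence of one cell's 8-direction scan: same children, related visited, exact count
theorem pvCorr_cell (n m : Int) (grid : List (List Int)) (c : Int × Int) (d : Int) :
    ∀ (l : List (Int × Int)) (V : List (List Bool)) (S : PySem.Set (Int × Int)), pvR n m V S →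
      pvR n m (l.foldl (pvStepA n m grid c d) (V, [])).1 (l.foldl (pvStepB n m grid c) (S, [])).1
      ∧ (l.foldl (pvStepA n m grid c d) (V, [])).2
          = (l.foldl (pvStepB n m grid c) (S, [])).2.map (fun p => (p, d + 1))
      ∧ pvUnvis (l.foldl (pvStepA n m grid c d) (V, [])).1
          + (l.foldl (pvStepB n m grid c) (S, [])).2.length = pvUnvis V := by
  intro l
  induction l with
  | nil => intro V S hR; exact ⟨hR, rfl, rfl⟩
  | cons dxy l ih =>
    intro V S hR
    simp only [List.foldl_cons]
    by_cases hg : 0 ≤ c.1 + dxy.1 ∧ c.1 + dxy.1 < n ∧ 0 ≤ c.2 + dxy.2 ∧ c.2 + dxy.2 < m ∧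
        pvVGet V (c.1 + dxy.1) (c.2 + dxy.2) = false ∧ pvGridAt grid (c.1 + dxy.1) (c.2 + dxy.2) = 0
    · obtain ⟨h1, h2, h3, h4, h5, h6⟩ := hg
      have hgB : ¬ ((c.1 + dxy.1, c.2 + dxy.2) ∈ S) := by
        intro hmem
        have ht := (hR.2 _ _ h1 h2 h3 h4).mpr hmem
        rw [ht] at h5
        exact absurd h5 (by simp)
      have hA : pvStepA n m grid c d (V, []) dxy
          = (pvVSet V (c.1 + dxy.1) (c.2 + dxy.2), [((c.1 + dxy.1, c.2 + dxy.2), d + 1)]) := by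
        simp only [pvStepA]
        rw [if_pos ⟨h1, h2, h3, h4, h5, h6⟩]
        simp
      have hB : pvStepB n m grid c (S, []) dxy
          = (PySem.Set.add S (c.1 + dxy.1, c.2 + dxy.2), [(c.1 + dxy.1, c.2 + dxy.2)]) := by
        simp only [pvStepB]
        rw [if_pos ⟨h1, h2, h3, h4, hgB, h6⟩]
        simp
      rw [hA, hB,
        pvFoldl_state_acc _ (pvStepA_shape n m grid c d) l _ [((c.1 + dxy.1, c.2 + dxy.2), d + 1)],
        pvFoldl_state_acc _ (pvStepB_shape n m grid c) l _ [(c.1 + dxy.1, c.2 + dxy.2)]]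
      have hR' := pvR_add n m V S _ _ hR h1 h2 h3 h4
      have hU := pvUnvis_vset n m V _ _ hR.1 h1 h2 h3 h4 h5
      obtain ⟨ih1, ih2, ih3⟩ := ih _ _ hR'
      refine ⟨ih1, ?_, ?_⟩
      · simp [ih2]
      · simp only [List.length_append, List.length_cons, List.length_nil]
        omega
    · have hgB : ¬ (0 ≤ c.1 + dxy.1 ∧ c.1 + dxy.1 < n ∧ 0 ≤ c.2 + dxy.2 ∧ c.2 + dxy.2 < m ∧
          ¬ ((c.1 + dxy.1, c.2 + dxy.2) ∈ S) ∧ pvGridAt grid (c.1 + dxy.1) (c.2 + dxy.2) = 0) := by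
        rintro ⟨h1, h2, h3, h4, h5, h6⟩
        refine hg ⟨h1, h2, h3, h4, ?_, h6⟩
        cases hb : pvVGet V (c.1 + dxy.1) (c.2 + dxy.2)
        · rfl
        · exact absurd ((hR.2 _ _ h1 h2 h3 h4).mp hb) h5
      have hA : pvStepA n m grid c d (V, []) dxy = (V, []) := by
        simp only [pvStepA]; rw [if_neg hg]
      have hB : pvStepB n m grid c (S, []) dxy = (S, []) := by
        simp only [pvStepB]; rw [if_neg hgB]
      rw [hA, hB]
      exact ih V S hR

-- A consumes one whole BFS layer exactly as B's pvExpand does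
theorem pvLayer (n m : Int) (grid : List (List Int)) (d : Int) :
    ∀ (f : List (Int × Int)) (V : List (List Bool)) (S : PySem.Set (Int × Int))
      (acc : List (Int × Int)) (fuel : Nat) (dist : Int), pvR n m V S →
      ∃ V', pvR n m V' (f.foldl (fun s c => pvDirs.foldl (pvStepB n m grid c) s) (S, acc)).1
        ∧ pvUnvis V' + (f.foldl (fun s c => pvDirs.foldl (pvStepB n m grid c) s) (S, acc)).2.length
            = pvUnvis V + acc.length
        ∧ pvALoop n m grid (f.length + fuel)
            (f.map (fun p => (p, d)) ++ acc.map (fun p => (p, d + 1))) V dist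
          = pvALoop n m grid fuel
              ((f.foldl (fun s c => pvDirs.foldl (pvStepB n m grid c) s) (S, acc)).2.map
                (fun p => (p, d + 1)))
              V' (if f = [] then dist else d) := by
  intro f
  induction f with
  | nil =>
    intro V S acc fuel dist hR
    exact ⟨V, hR, rfl, by simp⟩
  | cons c f ih =>
    intro V S acc fuel dist hR
    have hfuel : (c :: f).length + fuel = (f.length + fuel) + 1 := by
      simp only [List.length_cons]; omega
    rw [hfuel]
    simp only [List.map_cons, List.cons_append, List.foldl_cons]
    rw [pvALoop_cons]
    rw [pvFoldl_state_acc _ (pvStepA_shape n m grid c d) pvDirs _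
          (f.map (fun p => (p, d)) ++ acc.map (fun p => (p, d + 1))),
        pvFoldl_state_acc _ (pvStepB_shape n m grid c) pvDirs _ acc]
    obtain ⟨hc1, hc2, hc3⟩ := pvCorr_cell n m grid c d pvDirs V S hR
    obtain ⟨V', hR', hcnt, heq⟩ :=
      ih (pvDirs.foldl (pvStepA n m grid c d) (V, [])).1
         (pvDirs.foldl (pvStepB n m grid c) (S, [])).1
         (acc ++ (pvDirs.foldl (pvStepB n m grid c) (S, [])).2) fuel d hc1
    refine ⟨V', hR', ?_, ?_⟩
    · rw [hcnt]
      simp only [List.length_append]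
      omega
    · have hq : (f.map (fun p => (p, d)) ++ acc.map (fun p => (p, d + 1)))
            ++ (pvDirs.foldl (pvStepA n m grid c d) (V, [])).2
          = f.map (fun p => (p, d))
            ++ (acc ++ (pvDirs.foldl (pvStepB n m grid c) (S, [])).2).map (fun p => (p, d + 1)) := by
        rw [hc2]
        simp [List.append_assoc]
      rw [hq, heq]
      simp

-- the two BFS loops agree whenever the fuels dominate the respective measures
theorem pvMain (n m : Int) (grid : List (List Int)) :
    ∀ (fuelB : Nat) (f : List (Int × Int)) (V : List (List Bool)) (S : PySem.Set (Int × Int))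
      (d dist : Int) (fuelA : Nat), pvR n m V S → f ≠ [] → pvUnvis V < fuelB →
      f.length + pvUnvis V ≤ fuelA →
      pvALoop n m grid fuelA (f.map (fun p => (p, d))) V dist = pvBLoop n m grid fuelB f S d := by
  intro fuelB
  induction fuelB with
  | zero => intro f V S d dist fuelA hR hf hub hua; omega
  | succ k ih =>
    intro f V S d dist fuelA hR hf hub hua
    have hfl : f.length ≤ fuelA := by omega
    obtain ⟨V', hR', hcnt, heq⟩ := pvLayer n m grid d f V S [] (fuelA - f.length) dist hR
    have hresfuel : f.length + (fuelA - f.length) = fuelA := by omega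
    rw [hresfuel] at heq
    simp only [List.map_nil, List.append_nil, List.length_nil, Nat.add_zero] at heq hcnt hR'
    rw [if_neg hf] at heq
    have hexp : (f.foldl (fun s c => pvDirs.foldl (pvStepB n m grid c) s) (S, []))
        = pvExpand n m grid S f := rfl
    rw [hexp] at heq hcnt hR'
    rw [pvBLoop_succ, if_neg hf]
    by_cases hE : (pvExpand n m grid S f).2 = []
    · rw [if_pos hE, heq, hE]
      simp [pvALoop_nil]
    · rw [if_neg hE, heq]
      have hlen1 : 1 ≤ (pvExpand n m grid S f).2.length := by
        have := List.length_pos_iff.mpr hE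
        omega
      exact ih _ _ _ _ d _ hR' hE (by omega) (by omega)

theorem pvBlank_dims (n m : Int) :
    pvDims n m (List.replicate n.toNat (List.replicate m.toNat false)) := by
  refine ⟨by simp, ?_⟩
  intro row hrow
  rw [List.eq_of_mem_replicate hrow]
  simp

theorem pvBlank_get (n m : Int) (x y : Int) (hx0 : 0 ≤ x) (hxn : x < n) (hy0 : 0 ≤ y) (hym : y < m) :
    pvVGet (List.replicate n.toNat (List.replicate m.toNat false)) x y = false := by
  rw [pvVGet_eq _ x y hx0 hy0]
  rw [List.getD_eq_getElem _ [] (by simp; omega), List.getElem_replicate,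
    List.getD_eq_getElem _ true (by simp; omega), List.getElem_replicate]

theorem pvBlank_unvis (n m : Int) :
    pvUnvis (List.replicate n.toNat (List.replicate m.toNat false)) = n.toNat * m.toNat := by
  simp [pvUnvis, List.map_replicate, List.sum_replicate, smul_eq_mul]

theorem pvBfs_eq (n m : Int) (grid : List (List Int)) (i j : Int)
    (hi0 : 0 ≤ i) (hin : i < n) (hj0 : 0 ≤ j) (hjm : j < m) :
    pvBfsA n m grid (i, j) = pvBfsB n m grid (i, j) := by
  unfold pvBfsA pvBfsB
  dsimp only
  have hbd := pvBlank_dims n m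
  have hR0 : pvR n m (pvVSet (List.replicate n.toNat (List.replicate m.toNat false)) i j)
      (PySem.Set.ofList [(i, j)]) := by
    refine ⟨pvDims_vset n m _ i j hbd hi0 hin hj0, ?_⟩
    intro x y hx0 hxn hy0 hym
    rw [pvVGet_vset n m _ i j x y hbd hi0 hin hj0 hjm hx0 hy0]
    rw [PySem.Set.mem_ofList]
    by_cases hxy : x = i ∧ y = j
    · simp [hxy.1, hxy.2]
    · rw [if_neg hxy, pvBlank_get n m x y hx0 hxn hy0 hym]
      have : ¬ ((x, y) = (i, j)) := by simp only [Prod.mk.injEq]; exact hxy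
      simp [this]
  have hU0 : pvUnvis (pvVSet (List.replicate n.toNat (List.replicate m.toNat false)) i j) + 1
      = n.toNat * m.toNat := by
    rw [pvUnvis_vset n m _ i j hbd hi0 hin hj0 hjm
      (pvBlank_get n m i j hi0 hin hj0 hjm), pvBlank_unvis]
  have hpos : 1 ≤ n.toNat * m.toNat := Nat.mul_pos (by omega) (by omega)
  have hmap : [((i, j), (0 : Int))] = [((i, j) : Int × Int)].map (fun p => (p, (0 : Int))) := rfl
  rw [hmap]
  exact pvMain n m grid (n.toNat * m.toNat) [(i, j)] _ _ 0 0 (n.toNat * m.toNat) hR0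
    (by simp) (by omega) (by simp; omega)

theorem pvPorts_eq (n m : Int) (grid : List (List Int)) :
    find_safest_distance n m grid = find_safest_distance_alt n m grid := by
  unfold find_safest_distance find_safest_distance_alt
  apply PySem.List.foldl_congr_mem
  intro best i hi
  apply PySem.List.foldl_congr_mem
  intro b j hj
  rw [PySem.List.mem_pyRange_one] at hi hj
  by_cases hg : pvGridAt grid i j = 0
  · rw [if_pos hg, if_pos hg, pvBfs_eq n m grid i j hi.1 hi.2 hj.1 hj.2]
  · rw [if_neg hg, if_neg hg]

-- ===== VERDICT (by name: the statement is the Claim_ definition above) =====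
theorem find_safest_distance_spec : Claim_equal_find_safest_distance := by
  intro n m grid _ _
  unfold Spec_find_safest_distance
  exact pvPorts_eq n m grid
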